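-- pv_equiv track=rewrite | github.com/skitela/potential-robot | TOOLS/audit_symbols_get_mt5.py | resolve_target_hits
-- ===== SOURCE A (Python) =====
-- from typing import Any, Dict, List, Sequence
--
-- TARGET_BASES = ("EURUSD", "GBPUSD", "XAUUSD", "DAX40", "US500")
--
-- ALIAS_BASES: Dict[str, Sequence[str]] = {
--     "EURUSD": ("EURUSD",),
--     "GBPUSD": ("GBPUSD",),
--     "XAUUSD": ("XAUUSD", "GOLD"),
--     "DAX40": ("DAX40", "DE40", "DE30", "GER40", "GER30"),
--     "US500": ("US500", "SPX500"),
-- }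
--
-- def _norm(value: str) -> str:
--     return str(value or "").strip().upper()
--
-- def _symbol_matches_alias(symbol_name: str, alias_base: str) -> bool:
--     sym = _norm(symbol_name)
--     alias = _norm(alias_base)
--     return bool(sym == alias or sym.startswith(alias + "."))
--
-- def resolve_target_hits(symbol_names: Sequence[str]) -> Dict[str, List[str]]:
--     hits: Dict[str, List[str]] = {}
--     norm_names = [_norm(x) for x in symbol_names if _norm(x)]
--     for target in TARGET_BASES:
--         out: List[str] = []
--         for sym in norm_names:
--             if any(_symbol_matches_alias(sym, alias) for alias in ALIAS_BASES.get(target, (target,))):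
--                 out.append(sym)
--         hits[target] = sorted(set(out))
--     return hits
-- ===== SOURCE B (Python) =====
-- from typing import Dict, List, Sequence
--
-- TARGET_BASES = ("EURUSD", "GBPUSD", "XAUUSD", "DAX40", "US500")
--
-- # inverted alias->target map, written out once
-- ALIAS_TO_TARGET: Dict[str, str] = {
--     "EURUSD": "EURUSD",
--     "GBPUSD": "GBPUSD",
--     "XAUUSD": "XAUUSD", "GOLD": "XAUUSD",
--     "DAX40": "DAX40", "DE40": "DAX40", "DE30": "DAX40",
--     "GER40": "DAX40", "GER30": "DAX40",
--     "US500": "US500", "SPX500": "US500",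
-- }
--
-- def resolve_target_hits(symbol_names: Sequence[str]) -> Dict[str, List[str]]:
--     # dedup the normalized names globally, sort once, then route each
--     # name to the target owning its first-dot base; each bucket comes
--     # out already sorted and duplicate-free.
--     seen = set()
--     for x in symbol_names:
--         s = str(x or "").strip().upper()
--         if s:
--             seen.add(s)
--     hits: Dict[str, List[str]] = {t: [] for t in TARGET_BASES}
--     for sym in sorted(seen):
--         t = ALIAS_TO_TARGET.get(sym.split(".", 1)[0])
--         if t is not None:
--             hits[t].append(sym)
--     return hits
-- ===== Notes on version B (the rewrite author's own statement) =====
-- stated objective: faster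
-- what changed: A scans the whole symbol list once per target (5 passes), re-normalizing symbol and alias on every comparison and doing a per-bucket sorted(set(...)); B dedups the normalized names into one global set, sorts that set once, and makes a single partition pass routing each name by its first-dot base through a literal inverted alias-to-target map, so buckets come out sorted and duplicate-free with no per-bucket post-processing.
import Mathlib
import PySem

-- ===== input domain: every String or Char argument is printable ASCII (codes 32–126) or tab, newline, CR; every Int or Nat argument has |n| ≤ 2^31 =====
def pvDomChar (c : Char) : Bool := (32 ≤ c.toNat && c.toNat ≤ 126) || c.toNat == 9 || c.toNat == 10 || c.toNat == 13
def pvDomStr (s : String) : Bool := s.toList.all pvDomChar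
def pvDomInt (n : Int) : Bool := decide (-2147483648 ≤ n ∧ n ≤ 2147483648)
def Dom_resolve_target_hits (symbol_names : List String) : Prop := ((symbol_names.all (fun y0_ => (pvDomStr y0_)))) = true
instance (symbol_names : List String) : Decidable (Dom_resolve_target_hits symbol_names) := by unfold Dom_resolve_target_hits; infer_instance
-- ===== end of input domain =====

-- B replaces A's five repeated scans (one per target, each testing every alias, then per-bucket
-- sorted(set)) by one global dedup of the normalized names, one sort, and a single partition pass
-- routing each name by its first-dot base through a literal inverted alias→target map (objective: faster; a timing run measured B faster).

-- ===== PORT A =====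
def pvA_TARGET_BASES : List (List Char) :=
  ["EURUSD".toList, "GBPUSD".toList, "XAUUSD".toList, "DAX40".toList, "US500".toList]

def pvA_ALIAS_BASES : PySem.Dict (List Char) (List (List Char)) :=
  PySem.Dict.ofList
    [("EURUSD".toList, ["EURUSD".toList]),
     ("GBPUSD".toList, ["GBPUSD".toList]),
     ("XAUUSD".toList, ["XAUUSD".toList, "GOLD".toList]),
     ("DAX40".toList, ["DAX40".toList, "DE40".toList, "DE30".toList, "GER40".toList, "GER30".toList]),
     ("US500".toList, ["US500".toList, "SPX500".toList])]

-- str(value or "").strip().upper()  (for a str argument, `value or ""` is `value` unless it is empty)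
def pvA_norm (value : List Char) : List Char :=
  PySem.Chars.upper (PySem.Chars.strip (if value == [] then [] else value))

def pvA_symbol_matches_alias (symbol_name al_base : List Char) : Bool :=
  let sym := pvA_norm symbol_name
  let al := pvA_norm al_base
  sym == al || PySem.Chars.startswith sym (al ++ ['.'])

def resolve_target_hits (symbol_names : List String) : List (String × List String) :=
  let norm_names : List (List Char) :=
    ((symbol_names.map String.toList).filter (fun x => !(pvA_norm x == []))).map pvA_norm
  let hits : PySem.Dict (List Char) (List (List Char)) :=
    pvA_TARGET_BASES.foldl (fun hits target =>
      let out : List (List Char) :=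
        norm_names.foldl (fun out sym =>
          if (pvA_ALIAS_BASES.getD target [target]).any (fun al => pvA_symbol_matches_alias sym al)
          then out ++ [sym] else out) []
      hits.insert target (PySem.List.sorted (PySem.Set.ofList out) (fun x => x))) PySem.Dict.empty
  hits.items.map (fun p => (String.ofList p.1, p.2.map String.ofList))

-- ===== PORT B =====
def pvB_TARGET_BASES : List (List Char) :=
  ["EURUSD".toList, "GBPUSD".toList, "XAUUSD".toList, "DAX40".toList, "US500".toList]

-- the literal inverted alias → target map of Source B
def pvB_ALIAS_TO_TARGET : PySem.Dict (List Char) (List Char) :=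
  PySem.Dict.ofList
    [("EURUSD".toList, "EURUSD".toList),
     ("GBPUSD".toList, "GBPUSD".toList),
     ("XAUUSD".toList, "XAUUSD".toList), ("GOLD".toList, "XAUUSD".toList),
     ("DAX40".toList, "DAX40".toList), ("DE40".toList, "DAX40".toList), ("DE30".toList, "DAX40".toList),
     ("GER40".toList, "DAX40".toList), ("GER30".toList, "DAX40".toList),
     ("US500".toList, "US500".toList), ("SPX500".toList, "US500".toList)]

def resolve_target_hits_alt (symbol_names : List String) : List (String × List String) :=
  -- seen: the set of non-empty normalized names ('str(x or "").strip().upper()' inlined)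
  let seen : PySem.Set (List Char) :=
    symbol_names.foldl (fun s x =>
      let u := PySem.Chars.upper (PySem.Chars.strip (if x.toList == [] then [] else x.toList))
      if u == [] then s else PySem.Set.add s u) PySem.Set.empty
  let hits0 : PySem.Dict (List Char) (List (List Char)) :=
    pvB_TARGET_BASES.foldl (fun d t => d.insert t []) PySem.Dict.empty
  -- one partition pass over sorted(seen); sym.split(".", 1)[0] is the head of a never-empty split
  let hits := (PySem.List.sorted seen (fun x => x)).foldl (fun d sym =>
      match pvB_ALIAS_TO_TARGET.get? ((PySem.Chars.splitOnMax sym ['.'] 1).headD []) with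
      | some t => d.modify t [] (fun l => l ++ [sym])
      | none => d) hits0
  hits.items.map (fun p => (String.ofList p.1, p.2.map String.ofList))

-- ===== PRECONDITION & SPEC =====
def Spec_resolve_target_hits (symbol_names : List String) (out : List (String × List String)) : Prop := out = resolve_target_hits_alt symbol_names
instance (symbol_names : List String) (out : List (String × List String)) : Decidable (Spec_resolve_target_hits symbol_names out) := by unfold Spec_resolve_target_hits; infer_instance

-- ===== CLAIM (what is proved, stated in full; the proofs are below) =====
def Claim_equal_resolve_target_hits : Prop := ∀ (symbol_names : List String), Dom_resolve_target_hits symbol_names → Spec_resolve_target_hits symbol_names (resolve_target_hits symbol_names)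

-- ===== LEMMAS AND PROOFS =====

-- ---- character-level facts: upper/strip are idempotent and commute ----
theorem pv_char_toNat_ofNat (n : Nat) (h : n < 55296) : (Char.ofNat n).toNat = n := by
  rw [Char.toNat_ofNat, if_pos]; exact Or.inl h

theorem pv_islower_range (X : Char) (h1 : 65 ≤ X.toNat) (h2 : X.toNat ≤ 90) : PySem.Chars.islower X = false := by
  simp only [PySem.Chars.islower, Char.le_def, UInt32.le_iff_toNat_le, Bool.and_eq_false_iff, decide_eq_false_iff_not]
  have hx : X.val.toNat = X.toNat := rfl
  have ha : ('a').val.toNat = 97 := rfl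
  have hz : ('z').val.toNat = 122 := rfl
  omega

theorem pv_isspace_range (X : Char) (h1 : 65 ≤ X.toNat) (h2 : X.toNat ≤ 122) : PySem.Chars.isspace X = false := by
  simp only [PySem.Chars.isspace, Bool.or_eq_false_iff, Bool.and_eq_false_iff, decide_eq_false_iff_not]
  omega

theorem pv_islower_toNat (c : Char) (h : PySem.Chars.islower c = true) : 97 ≤ c.toNat ∧ c.toNat ≤ 122 := by
  simp only [PySem.Chars.islower, Char.le_def, UInt32.le_iff_toNat_le, Bool.and_eq_true, decide_eq_true_eq] at h
  have hx : c.val.toNat = c.toNat := rfl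
  have ha : ('a').val.toNat = 97 := rfl
  have hz : ('z').val.toNat = 122 := rfl
  omega

theorem pv_upperChar_of_not_lower (c : Char) (h : PySem.Chars.islower c = false) : PySem.Chars.upperChar c = c := by
  simp [PySem.Chars.upperChar, h]

theorem pv_islower_upperChar (c : Char) : PySem.Chars.islower (PySem.Chars.upperChar c) = false := by
  by_cases h : PySem.Chars.islower c = true
  · obtain ⟨h1, h2⟩ := pv_islower_toNat c h
    have ht : (Char.ofNat (c.toNat - 32)).toNat = c.toNat - 32 := pv_char_toNat_ofNat _ (by omega)
    simp only [PySem.Chars.upperChar, h, if_true]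
    exact pv_islower_range _ (by omega) (by omega)
  · simp only [PySem.Chars.upperChar, h]
    simpa using h

theorem pv_upperChar_idem (c : Char) : PySem.Chars.upperChar (PySem.Chars.upperChar c) = PySem.Chars.upperChar c :=
  pv_upperChar_of_not_lower _ (pv_islower_upperChar c)

theorem pv_isspace_upperChar (c : Char) : PySem.Chars.isspace (PySem.Chars.upperChar c) = PySem.Chars.isspace c := by
  by_cases h : PySem.Chars.islower c = true
  · obtain ⟨h1, h2⟩ := pv_islower_toNat c h
    have ht : (Char.ofNat (c.toNat - 32)).toNat = c.toNat - 32 := pv_char_toNat_ofNat _ (by omega)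
    simp only [PySem.Chars.upperChar, h, if_true]
    rw [pv_isspace_range _ (by omega) (by omega), pv_isspace_range c (by omega) (by omega)]
  · simp [PySem.Chars.upperChar, h]

theorem pv_isspace_comp : (PySem.Chars.isspace ∘ PySem.Chars.upperChar) = PySem.Chars.isspace :=
  funext pv_isspace_upperChar

theorem pv_upper_idem (s : List Char) : PySem.Chars.upper (PySem.Chars.upper s) = PySem.Chars.upper s := by
  simp only [PySem.Chars.upper, List.map_map]
  exact List.map_congr_left (fun c _ => pv_upperChar_idem c)

theorem pv_lstrip_upper (s : List Char) : PySem.Chars.lstrip (PySem.Chars.upper s) = PySem.Chars.upper (PySem.Chars.lstrip s) := by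
  simp only [PySem.Chars.lstrip, PySem.Chars.upper, List.dropWhile_map]
  rw [pv_isspace_comp]

theorem pv_rstrip_upper (s : List Char) : PySem.Chars.rstrip (PySem.Chars.upper s) = PySem.Chars.upper (PySem.Chars.rstrip s) := by
  simp only [PySem.Chars.rstrip, PySem.Chars.upper, ← List.map_reverse, List.dropWhile_map]
  rw [pv_isspace_comp]

theorem pv_strip_upper (s : List Char) : PySem.Chars.strip (PySem.Chars.upper s) = PySem.Chars.upper (PySem.Chars.strip s) := by
  simp only [PySem.Chars.strip, pv_lstrip_upper, pv_rstrip_upper]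

theorem pv_dropWhile_dropWhile (p : Char → Bool) (l : List Char) :
    (l.dropWhile p).dropWhile p = l.dropWhile p := by
  induction l with
  | nil => rfl
  | cons x xs ih =>
      by_cases hp : p x = true
      · simp [List.dropWhile_cons, hp, ih]
      · simp [List.dropWhile_cons, hp]

theorem pv_dropWhile_cons_false (p : Char → Bool) (s : List Char) (d : Char) (r : List Char)
    (h : s.dropWhile p = d :: r) : p d = false := by
  have hne : s.dropWhile p ≠ [] := by simp [h]
  have := List.head_dropWhile_not p (l := s) hne
  simpa [h] using this

theorem pv_rstrip_idem (s : List Char) : PySem.Chars.rstrip (PySem.Chars.rstrip s) = PySem.Chars.rstrip s := by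
  simp only [PySem.Chars.rstrip, List.reverse_reverse]
  rw [pv_dropWhile_dropWhile]

theorem pv_lstrip_rstrip_lstrip (s : List Char) :
    PySem.Chars.lstrip (PySem.Chars.rstrip (PySem.Chars.lstrip s)) = PySem.Chars.rstrip (PySem.Chars.lstrip s) := by
  simp only [PySem.Chars.lstrip, PySem.Chars.rstrip]
  set t := s.dropWhile PySem.Chars.isspace with ht
  have hpre : (t.reverse.dropWhile PySem.Chars.isspace).reverse <+: t := by
    have h1 := List.dropWhile_suffix (l := t.reverse) PySem.Chars.isspace
    have h2 := (List.reverse_prefix (l₁ := t.reverse.dropWhile PySem.Chars.isspace) (l₂ := t.reverse)).mpr h1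
    simpa using h2
  obtain ⟨u, hu⟩ := hpre
  cases hr : (t.reverse.dropWhile PySem.Chars.isspace).reverse with
  | nil => simp [hr]
  | cons d ds =>
      have hth : t = d :: (ds ++ u) := by rw [← hu, hr]; simp
      have hd : PySem.Chars.isspace d = false :=
        pv_dropWhile_cons_false PySem.Chars.isspace s d (ds ++ u) (by rw [← ht]; exact hth)
      rw [List.dropWhile_cons_of_neg (by simp [hd])]

theorem pv_strip_idem (s : List Char) : PySem.Chars.strip (PySem.Chars.strip s) = PySem.Chars.strip s := by
  simp only [PySem.Chars.strip]
  rw [pv_lstrip_rstrip_lstrip, pv_rstrip_idem]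

theorem pv_norm_eq (s : List Char) : pvA_norm s = PySem.Chars.upper (PySem.Chars.strip s) := by
  by_cases h : s = []
  · subst h; rfl
  · simp [pvA_norm, h]

theorem pv_norm_idem (s : List Char) : pvA_norm (pvA_norm s) = pvA_norm s := by
  rw [pv_norm_eq, pv_norm_eq, pv_strip_upper, pv_upper_idem, pv_strip_idem]

-- ---- base extraction: `sym == alias or sym.startswith(alias + ".")` is `takeWhile (≠ '.') sym == alias` ----
def pvBaseP (c : Char) : Bool := c != '.'

theorem pv_takeWhile_append_stop (p : Char → Bool) (a t : List Char) (h : ∀ x ∈ a, p x) (c : Char) (hc : p c = false) :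
    (a ++ c :: t).takeWhile p = a := by
  induction a with
  | nil => simp [hc]
  | cons x xs ih =>
      simp only [List.cons_append, List.takeWhile_cons, h x (by simp), if_true, List.cons.injEq, true_and]
      exact ih (fun y hy => h y (by simp [hy]))

theorem pv_match_iff (a s : List Char) (ha : ∀ x ∈ a, pvBaseP x) :
    (s == a || PySem.Chars.startswith s (a ++ ['.'])) = (s.takeWhile pvBaseP == a) := by
  rw [Bool.eq_iff_iff]
  simp only [Bool.or_eq_true, beq_iff_eq, PySem.Chars.startswith_iff]
  constructor
  · rintro (rfl | ⟨t, rfl⟩)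
    · exact List.takeWhile_eq_self_iff.mpr ha
    · rw [List.append_assoc, List.singleton_append]
      exact pv_takeWhile_append_stop _ _ _ ha '.' (by decide)
  · intro h
    have hs : s = a ++ s.dropWhile pvBaseP := by rw [← h]; exact (List.takeWhile_append_dropWhile).symm
    cases hd : s.dropWhile pvBaseP with
    | nil => left; rw [hs, hd, List.append_nil]
    | cons d ds =>
        have hpd : pvBaseP d = false := by
          have := List.head_dropWhile_not pvBaseP (l := s) (by simp [hd])
          simpa [hd] using this
        have hd' : d = '.' := by simpa [pvBaseP] using hpd
        right
        refine ⟨ds, ?_⟩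
        rw [hs, hd, hd']
        simp

-- ---- split(".", 1)[0] is takeWhile (≠ '.') ----
theorem pv_go_m0 (fuel : Nat) (l cur : List Char) (acc : List (List Char)) :
    PySem.Chars.splitOnMax.go ['.'] fuel 0 l cur acc = ((cur.reverse ++ l) :: acc).reverse := by
  cases fuel with
  | zero => rfl
  | succ f => cases l with
    | nil => simp [PySem.Chars.splitOnMax.go]
    | cons c rest => simp [PySem.Chars.splitOnMax.go]

theorem pv_go_m1 (fuel : Nat) (l cur : List Char) (h : l.length < fuel) :
    ∃ rest, PySem.Chars.splitOnMax.go ['.'] fuel 1 l cur [] = (cur.reverse ++ l.takeWhile pvBaseP) :: rest := by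
  induction fuel generalizing l cur with
  | zero => omega
  | succ f ih =>
      cases l with
      | nil => exact ⟨[], by simp [PySem.Chars.splitOnMax.go]⟩
      | cons c rest =>
          by_cases hc : c = '.'
          · subst hc
            refine ⟨[rest], ?_⟩
            simp only [PySem.Chars.splitOnMax.go]
            rw [if_neg (by omega)]
            rw [if_pos (by simp)]
            rw [pv_go_m0]
            simp [pvBaseP]
          · have hpre : (['.'] : List Char).isPrefixOf (c :: rest) = false := by
              simp only [List.isPrefixOf, Bool.and_eq_false_iff, beq_eq_false_iff_ne, ne_eq]
              exact Or.inl (fun h => hc h.symm)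
            obtain ⟨r, hr⟩ := ih rest (c :: cur) (by simpa using Nat.lt_of_succ_lt_succ h)
            refine ⟨r, ?_⟩
            simp only [PySem.Chars.splitOnMax.go]
            rw [if_neg (by omega), hpre]
            simpa [pvBaseP, hc] using hr

theorem pv_split_head (s : List Char) :
    (PySem.Chars.splitOnMax s ['.'] 1).headD [] = s.takeWhile pvBaseP := by
  have h : ¬ ((1 : Int) < 0) := by omega
  obtain ⟨rest, hr⟩ := pv_go_m1 (s.length + 1) s [] (by omega)
  simp only [PySem.Chars.splitOnMax, if_neg h]
  norm_num
  rw [hr]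
  simp

-- ---- the inverted index, in closed form ----
theorem pv_index_get? (b : List Char) :
    pvB_ALIAS_TO_TARGET.get? b =
      if "EURUSD".toList == b then some "EURUSD".toList
      else if "GBPUSD".toList == b then some "GBPUSD".toList
      else if "XAUUSD".toList == b then some "XAUUSD".toList
      else if "GOLD".toList == b then some "XAUUSD".toList
      else if "DAX40".toList == b then some "DAX40".toList
      else if "DE40".toList == b then some "DAX40".toList
      else if "DE30".toList == b then some "DAX40".toList
      else if "GER40".toList == b then some "DAX40".toList
      else if "GER30".toList == b then some "DAX40".toList
      else if "US500".toList == b then some "US500".toList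
      else if "SPX500".toList == b then some "US500".toList
      else none := by
  have hidx : pvB_ALIAS_TO_TARGET = PySem.Dict.mk
      [("EURUSD".toList, "EURUSD".toList), ("GBPUSD".toList, "GBPUSD".toList),
       ("XAUUSD".toList, "XAUUSD".toList), ("GOLD".toList, "XAUUSD".toList),
       ("DAX40".toList, "DAX40".toList), ("DE40".toList, "DAX40".toList),
       ("DE30".toList, "DAX40".toList), ("GER40".toList, "DAX40".toList),
       ("GER30".toList, "DAX40".toList), ("US500".toList, "US500".toList),
       ("SPX500".toList, "US500".toList)] := by decide
  rw [hidx]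
  simp only [PySem.Dict.get?_mk_cons]
  rfl

theorem pv_sma_eq (u a : List Char) (ha : ∀ x ∈ a, pvBaseP x) (hna : pvA_norm a = a) (hu : pvA_norm u = u) :
    pvA_symbol_matches_alias u a = (u.takeWhile pvBaseP == a) := by
  simp only [pvA_symbol_matches_alias, hu, hna]
  exact pv_match_iff a u ha

set_option maxRecDepth 8192 in
set_option maxHeartbeats 1000000 in
theorem pv_acond_EURUSD (u : List Char) (hu : pvA_norm u = u) :
    ((pvA_ALIAS_BASES.getD ("EURUSD".toList) ["EURUSD".toList]).any (fun al => pvA_symbol_matches_alias u al))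
      = (pvB_ALIAS_TO_TARGET.get? (u.takeWhile pvBaseP) == some ("EURUSD".toList)) := by
  have hget : pvA_ALIAS_BASES.getD ("EURUSD".toList) ["EURUSD".toList] = ["EURUSD".toList] := by decide
  rw [hget]
  simp only [List.any_cons, List.any_nil, Bool.or_false]
  have ha1 : ∀ x ∈ ("EURUSD".toList : List Char), pvBaseP x := by
    have h : ("EURUSD".toList : List Char).all pvBaseP = true := by decide
    simpa using List.all_eq_true.mp h
  have hn1 : pvA_norm ("EURUSD".toList) = "EURUSD".toList := by decide
  rw [pv_sma_eq u "EURUSD".toList ha1 hn1 hu]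
  rw [pv_index_get?]
  generalize u.takeWhile pvBaseP = b
  rw [Bool.eq_iff_iff]
  simp only [Bool.or_eq_true, beq_iff_eq]
  constructor
  · rintro (rfl) <;> decide
  · intro h
    split_ifs at h with h1 h2 h3 h4 h5 h6 h7 h8 h9 h10 h11
    · exact h1.symm
    · exact absurd h (by decide)
    · exact absurd h (by decide)
    · exact absurd h (by decide)
    · exact absurd h (by decide)
    · exact absurd h (by decide)
    · exact absurd h (by decide)
    · exact absurd h (by decide)
    · exact absurd h (by decide)
    · exact absurd h (by decide)
    · exact absurd h (by decide)

set_option maxRecDepth 8192 in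
set_option maxHeartbeats 1000000 in
theorem pv_acond_GBPUSD (u : List Char) (hu : pvA_norm u = u) :
    ((pvA_ALIAS_BASES.getD ("GBPUSD".toList) ["GBPUSD".toList]).any (fun al => pvA_symbol_matches_alias u al))
      = (pvB_ALIAS_TO_TARGET.get? (u.takeWhile pvBaseP) == some ("GBPUSD".toList)) := by
  have hget : pvA_ALIAS_BASES.getD ("GBPUSD".toList) ["GBPUSD".toList] = ["GBPUSD".toList] := by decide
  rw [hget]
  simp only [List.any_cons, List.any_nil, Bool.or_false]
  have ha1 : ∀ x ∈ ("GBPUSD".toList : List Char), pvBaseP x := by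
    have h : ("GBPUSD".toList : List Char).all pvBaseP = true := by decide
    simpa using List.all_eq_true.mp h
  have hn1 : pvA_norm ("GBPUSD".toList) = "GBPUSD".toList := by decide
  rw [pv_sma_eq u "GBPUSD".toList ha1 hn1 hu]
  rw [pv_index_get?]
  generalize u.takeWhile pvBaseP = b
  rw [Bool.eq_iff_iff]
  simp only [Bool.or_eq_true, beq_iff_eq]
  constructor
  · rintro (rfl) <;> decide
  · intro h
    split_ifs at h with h1 h2 h3 h4 h5 h6 h7 h8 h9 h10 h11
    · exact absurd h (by decide)
    · exact h2.symm
    · exact absurd h (by decide)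
    · exact absurd h (by decide)
    · exact absurd h (by decide)
    · exact absurd h (by decide)
    · exact absurd h (by decide)
    · exact absurd h (by decide)
    · exact absurd h (by decide)
    · exact absurd h (by decide)
    · exact absurd h (by decide)

set_option maxRecDepth 8192 in
set_option maxHeartbeats 1000000 in
theorem pv_acond_XAUUSD (u : List Char) (hu : pvA_norm u = u) :
    ((pvA_ALIAS_BASES.getD ("XAUUSD".toList) ["XAUUSD".toList]).any (fun al => pvA_symbol_matches_alias u al))
      = (pvB_ALIAS_TO_TARGET.get? (u.takeWhile pvBaseP) == some ("XAUUSD".toList)) := by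
  have hget : pvA_ALIAS_BASES.getD ("XAUUSD".toList) ["XAUUSD".toList] = ["XAUUSD".toList, "GOLD".toList] := by decide
  rw [hget]
  simp only [List.any_cons, List.any_nil, Bool.or_false]
  have ha1 : ∀ x ∈ ("XAUUSD".toList : List Char), pvBaseP x := by
    have h : ("XAUUSD".toList : List Char).all pvBaseP = true := by decide
    simpa using List.all_eq_true.mp h
  have hn1 : pvA_norm ("XAUUSD".toList) = "XAUUSD".toList := by decide
  have ha2 : ∀ x ∈ ("GOLD".toList : List Char), pvBaseP x := by
    have h : ("GOLD".toList : List Char).all pvBaseP = true := by decide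
    simpa using List.all_eq_true.mp h
  have hn2 : pvA_norm ("GOLD".toList) = "GOLD".toList := by decide
  rw [pv_sma_eq u "XAUUSD".toList ha1 hn1 hu, pv_sma_eq u "GOLD".toList ha2 hn2 hu]
  rw [pv_index_get?]
  generalize u.takeWhile pvBaseP = b
  rw [Bool.eq_iff_iff]
  simp only [Bool.or_eq_true, beq_iff_eq]
  constructor
  · rintro (rfl | rfl) <;> decide
  · intro h
    split_ifs at h with h1 h2 h3 h4 h5 h6 h7 h8 h9 h10 h11
    · exact absurd h (by decide)
    · exact absurd h (by decide)
    · exact Or.inl (h3.symm)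
    · exact Or.inr (h4.symm)
    · exact absurd h (by decide)
    · exact absurd h (by decide)
    · exact absurd h (by decide)
    · exact absurd h (by decide)
    · exact absurd h (by decide)
    · exact absurd h (by decide)
    · exact absurd h (by decide)

set_option maxRecDepth 8192 in
set_option maxHeartbeats 1000000 in
theorem pv_acond_DAX40 (u : List Char) (hu : pvA_norm u = u) :
    ((pvA_ALIAS_BASES.getD ("DAX40".toList) ["DAX40".toList]).any (fun al => pvA_symbol_matches_alias u al))
      = (pvB_ALIAS_TO_TARGET.get? (u.takeWhile pvBaseP) == some ("DAX40".toList)) := by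
  have hget : pvA_ALIAS_BASES.getD ("DAX40".toList) ["DAX40".toList] = ["DAX40".toList, "DE40".toList, "DE30".toList, "GER40".toList, "GER30".toList] := by decide
  rw [hget]
  simp only [List.any_cons, List.any_nil, Bool.or_false]
  have ha1 : ∀ x ∈ ("DAX40".toList : List Char), pvBaseP x := by
    have h : ("DAX40".toList : List Char).all pvBaseP = true := by decide
    simpa using List.all_eq_true.mp h
  have hn1 : pvA_norm ("DAX40".toList) = "DAX40".toList := by decide
  have ha2 : ∀ x ∈ ("DE40".toList : List Char), pvBaseP x := by
    have h : ("DE40".toList : List Char).all pvBaseP = true := by decide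
    simpa using List.all_eq_true.mp h
  have hn2 : pvA_norm ("DE40".toList) = "DE40".toList := by decide
  have ha3 : ∀ x ∈ ("DE30".toList : List Char), pvBaseP x := by
    have h : ("DE30".toList : List Char).all pvBaseP = true := by decide
    simpa using List.all_eq_true.mp h
  have hn3 : pvA_norm ("DE30".toList) = "DE30".toList := by decide
  have ha4 : ∀ x ∈ ("GER40".toList : List Char), pvBaseP x := by
    have h : ("GER40".toList : List Char).all pvBaseP = true := by decide
    simpa using List.all_eq_true.mp h
  have hn4 : pvA_norm ("GER40".toList) = "GER40".toList := by decide
  have ha5 : ∀ x ∈ ("GER30".toList : List Char), pvBaseP x := by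
    have h : ("GER30".toList : List Char).all pvBaseP = true := by decide
    simpa using List.all_eq_true.mp h
  have hn5 : pvA_norm ("GER30".toList) = "GER30".toList := by decide
  rw [pv_sma_eq u "DAX40".toList ha1 hn1 hu, pv_sma_eq u "DE40".toList ha2 hn2 hu, pv_sma_eq u "DE30".toList ha3 hn3 hu, pv_sma_eq u "GER40".toList ha4 hn4 hu, pv_sma_eq u "GER30".toList ha5 hn5 hu]
  rw [pv_index_get?]
  generalize u.takeWhile pvBaseP = b
  rw [Bool.eq_iff_iff]
  simp only [Bool.or_eq_true, beq_iff_eq]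
  constructor
  · rintro (rfl | rfl | rfl | rfl | rfl) <;> decide
  · intro h
    split_ifs at h with h1 h2 h3 h4 h5 h6 h7 h8 h9 h10 h11
    · exact absurd h (by decide)
    · exact absurd h (by decide)
    · exact absurd h (by decide)
    · exact absurd h (by decide)
    · exact Or.inl (h5.symm)
    · exact Or.inr (Or.inl (h6.symm))
    · exact Or.inr (Or.inr (Or.inl (h7.symm)))
    · exact Or.inr (Or.inr (Or.inr (Or.inl (h8.symm))))
    · exact Or.inr (Or.inr (Or.inr (Or.inr (h9.symm))))
    · exact absurd h (by decide)
    · exact absurd h (by decide)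

set_option maxRecDepth 8192 in
set_option maxHeartbeats 1000000 in
theorem pv_acond_US500 (u : List Char) (hu : pvA_norm u = u) :
    ((pvA_ALIAS_BASES.getD ("US500".toList) ["US500".toList]).any (fun al => pvA_symbol_matches_alias u al))
      = (pvB_ALIAS_TO_TARGET.get? (u.takeWhile pvBaseP) == some ("US500".toList)) := by
  have hget : pvA_ALIAS_BASES.getD ("US500".toList) ["US500".toList] = ["US500".toList, "SPX500".toList] := by decide
  rw [hget]
  simp only [List.any_cons, List.any_nil, Bool.or_false]
  have ha1 : ∀ x ∈ ("US500".toList : List Char), pvBaseP x := by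
    have h : ("US500".toList : List Char).all pvBaseP = true := by decide
    simpa using List.all_eq_true.mp h
  have hn1 : pvA_norm ("US500".toList) = "US500".toList := by decide
  have ha2 : ∀ x ∈ ("SPX500".toList : List Char), pvBaseP x := by
    have h : ("SPX500".toList : List Char).all pvBaseP = true := by decide
    simpa using List.all_eq_true.mp h
  have hn2 : pvA_norm ("SPX500".toList) = "SPX500".toList := by decide
  rw [pv_sma_eq u "US500".toList ha1 hn1 hu, pv_sma_eq u "SPX500".toList ha2 hn2 hu]
  rw [pv_index_get?]
  generalize u.takeWhile pvBaseP = b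
  rw [Bool.eq_iff_iff]
  simp only [Bool.or_eq_true, beq_iff_eq]
  constructor
  · rintro (rfl | rfl) <;> decide
  · intro h
    split_ifs at h with h1 h2 h3 h4 h5 h6 h7 h8 h9 h10 h11
    · exact absurd h (by decide)
    · exact absurd h (by decide)
    · exact absurd h (by decide)
    · exact absurd h (by decide)
    · exact absurd h (by decide)
    · exact absurd h (by decide)
    · exact absurd h (by decide)
    · exact absurd h (by decide)
    · exact absurd h (by decide)
    · exact Or.inl (h10.symm)
    · exact Or.inr (h11.symm)

-- ---- proof-side views ----
def pvNormNames (symbol_names : List String) : List (List Char) :=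
  ((symbol_names.map String.toList).filter (fun x => !(pvA_norm x == []))).map pvA_norm

def pvAout (t : List Char) (symbol_names : List String) : List (List Char) :=
  (pvNormNames symbol_names).filter
    (fun sym => (pvA_ALIAS_BASES.getD t [t]).any (fun al => pvA_symbol_matches_alias sym al))

def pvRoute (t : List Char) (L : List (List Char)) : List (List Char) :=
  L.filter (fun u => pvB_ALIAS_TO_TARGET.get? ((PySem.Chars.splitOnMax u ['.'] 1).headD []) == some t)

def pvBstep (d : PySem.Dict (List Char) (List (List Char))) (sym : List Char) :
    PySem.Dict (List Char) (List (List Char)) :=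
  match pvB_ALIAS_TO_TARGET.get? ((PySem.Chars.splitOnMax sym ['.'] 1).headD []) with
  | some t => d.modify t [] (fun l => l ++ [sym])
  | none => d

theorem pv_stepB_eq :
    (fun (d : PySem.Dict (List Char) (List (List Char))) (sym : List Char) =>
      match pvB_ALIAS_TO_TARGET.get? ((PySem.Chars.splitOnMax sym ['.'] 1).headD []) with
      | some t => d.modify t [] (fun l => l ++ [sym])
      | none => d) = pvBstep := rfl

theorem pv_if_bool_true {α : Type} (c : Bool) (h : c = true) (a b : α) :
    (if c = true then a else b) = a := by rw [h]; rfl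
theorem pv_if_bool_false {α : Type} (c : Bool) (h : c = false) (a b : α) :
    (if c = true then a else b) = b := by rw [h]; simp

theorem pv_filter_cons_append {α : Type} (p : α → Bool) (a : α) (l : List α) :
    (a :: l).filter p = (if p a = true then [a] else []) ++ l.filter p := by
  rw [List.filter_cons]
  by_cases h : p a = true
  · rw [pv_if_bool_true _ h, pv_if_bool_true _ h, List.singleton_append]
  · have hf : p a = false := Bool.eq_false_iff.mpr h
    rw [pv_if_bool_false _ hf, pv_if_bool_false _ hf, List.nil_append]

theorem pv_route_cons (t : List Char) (u : List Char) (L : List (List Char)) :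
    pvRoute t (u :: L) =
      (if (pvB_ALIAS_TO_TARGET.get? ((PySem.Chars.splitOnMax u ['.'] 1).headD []) == some t) = true
       then [u] else []) ++ pvRoute t L := by
  unfold pvRoute
  rw [pv_filter_cons_append]

set_option maxHeartbeats 2000000 in
theorem pv_index_target (b t : List Char) (h : pvB_ALIAS_TO_TARGET.get? b = some t) :
    t = "EURUSD".toList ∨ t = "GBPUSD".toList ∨ t = "XAUUSD".toList ∨ t = "DAX40".toList ∨ t = "US500".toList := by
  rw [pv_index_get?] at h
  split_ifs at h <;> (injection h with h2; subst h2; decide)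

set_option maxRecDepth 8192 in
set_option maxHeartbeats 2000000 in
theorem pv_bfold (L : List (List Char)) (l1 l2 l3 l4 l5 : List (List Char)) :
    List.foldl pvBstep (PySem.Dict.mk [("EURUSD".toList, l1), ("GBPUSD".toList, l2), ("XAUUSD".toList, l3), ("DAX40".toList, l4), ("US500".toList, l5)]) L =
    PySem.Dict.mk [("EURUSD".toList, l1 ++ pvRoute ("EURUSD".toList) L), ("GBPUSD".toList, l2 ++ pvRoute ("GBPUSD".toList) L), ("XAUUSD".toList, l3 ++ pvRoute ("XAUUSD".toList) L), ("DAX40".toList, l4 ++ pvRoute ("DAX40".toList) L), ("US500".toList, l5 ++ pvRoute ("US500".toList) L)] := by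
  induction L generalizing l1 l2 l3 l4 l5 with
  | nil => simp [pvRoute]
  | cons u us ih =>
      simp only [List.foldl_cons]
      cases hlk : pvB_ALIAS_TO_TARGET.get? ((PySem.Chars.splitOnMax u ['.'] 1).headD []) with
      | none =>
          have hstep : pvBstep (PySem.Dict.mk [("EURUSD".toList, l1), ("GBPUSD".toList, l2), ("XAUUSD".toList, l3), ("DAX40".toList, l4), ("US500".toList, l5)]) u =
              PySem.Dict.mk [("EURUSD".toList, l1), ("GBPUSD".toList, l2), ("XAUUSD".toList, l3), ("DAX40".toList, l4), ("US500".toList, l5)] := by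
            simp only [pvBstep]; rw [hlk]
          rw [hstep, ih]
          have e : ∀ t : List Char, pvRoute t (u :: us) = pvRoute t us := by
            intro t
            rw [pv_route_cons, pv_if_bool_false _ (by rw [hlk]; rfl), List.nil_append]
          rw [e, e, e, e, e]
      | some t =>
          have hstep : pvBstep (PySem.Dict.mk [("EURUSD".toList, l1), ("GBPUSD".toList, l2), ("XAUUSD".toList, l3), ("DAX40".toList, l4), ("US500".toList, l5)]) u =
              (PySem.Dict.mk [("EURUSD".toList, l1), ("GBPUSD".toList, l2), ("XAUUSD".toList, l3), ("DAX40".toList, l4), ("US500".toList, l5)]).modify t [] (fun l => l ++ [u]) := by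
            simp only [pvBstep]; rw [hlk]
          rcases pv_index_target _ _ hlk with rfl | rfl | rfl | rfl | rfl
          · rw [hstep]
            have hm : (PySem.Dict.mk [("EURUSD".toList, l1), ("GBPUSD".toList, l2), ("XAUUSD".toList, l3), ("DAX40".toList, l4), ("US500".toList, l5)]).modify ("EURUSD".toList) [] (fun l => l ++ [u]) =
                PySem.Dict.mk [("EURUSD".toList, l1 ++ [u]), ("GBPUSD".toList, l2), ("XAUUSD".toList, l3), ("DAX40".toList, l4), ("US500".toList, l5)] := rfl
            rw [hm, ih]
            rw [pv_route_cons ("EURUSD".toList), pv_if_bool_true _ (by rw [hlk]; decide), List.singleton_append]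
            rw [pv_route_cons ("GBPUSD".toList), pv_if_bool_false _ (by rw [hlk]; decide), List.nil_append]
            rw [pv_route_cons ("XAUUSD".toList), pv_if_bool_false _ (by rw [hlk]; decide), List.nil_append]
            rw [pv_route_cons ("DAX40".toList), pv_if_bool_false _ (by rw [hlk]; decide), List.nil_append]
            rw [pv_route_cons ("US500".toList), pv_if_bool_false _ (by rw [hlk]; decide), List.nil_append]
            simp [List.append_assoc]
          · rw [hstep]
            have hm : (PySem.Dict.mk [("EURUSD".toList, l1), ("GBPUSD".toList, l2), ("XAUUSD".toList, l3), ("DAX40".toList, l4), ("US500".toList, l5)]).modify ("GBPUSD".toList) [] (fun l => l ++ [u]) =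
                PySem.Dict.mk [("EURUSD".toList, l1), ("GBPUSD".toList, l2 ++ [u]), ("XAUUSD".toList, l3), ("DAX40".toList, l4), ("US500".toList, l5)] := rfl
            rw [hm, ih]
            rw [pv_route_cons ("EURUSD".toList), pv_if_bool_false _ (by rw [hlk]; decide), List.nil_append]
            rw [pv_route_cons ("GBPUSD".toList), pv_if_bool_true _ (by rw [hlk]; decide), List.singleton_append]
            rw [pv_route_cons ("XAUUSD".toList), pv_if_bool_false _ (by rw [hlk]; decide), List.nil_append]
            rw [pv_route_cons ("DAX40".toList), pv_if_bool_false _ (by rw [hlk]; decide), List.nil_append]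
            rw [pv_route_cons ("US500".toList), pv_if_bool_false _ (by rw [hlk]; decide), List.nil_append]
            simp [List.append_assoc]
          · rw [hstep]
            have hm : (PySem.Dict.mk [("EURUSD".toList, l1), ("GBPUSD".toList, l2), ("XAUUSD".toList, l3), ("DAX40".toList, l4), ("US500".toList, l5)]).modify ("XAUUSD".toList) [] (fun l => l ++ [u]) =
                PySem.Dict.mk [("EURUSD".toList, l1), ("GBPUSD".toList, l2), ("XAUUSD".toList, l3 ++ [u]), ("DAX40".toList, l4), ("US500".toList, l5)] := rfl
            rw [hm, ih]
            rw [pv_route_cons ("EURUSD".toList), pv_if_bool_false _ (by rw [hlk]; decide), List.nil_append]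
            rw [pv_route_cons ("GBPUSD".toList), pv_if_bool_false _ (by rw [hlk]; decide), List.nil_append]
            rw [pv_route_cons ("XAUUSD".toList), pv_if_bool_true _ (by rw [hlk]; decide), List.singleton_append]
            rw [pv_route_cons ("DAX40".toList), pv_if_bool_false _ (by rw [hlk]; decide), List.nil_append]
            rw [pv_route_cons ("US500".toList), pv_if_bool_false _ (by rw [hlk]; decide), List.nil_append]
            simp [List.append_assoc]
          · rw [hstep]
            have hm : (PySem.Dict.mk [("EURUSD".toList, l1), ("GBPUSD".toList, l2), ("XAUUSD".toList, l3), ("DAX40".toList, l4), ("US500".toList, l5)]).modify ("DAX40".toList) [] (fun l => l ++ [u]) =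
                PySem.Dict.mk [("EURUSD".toList, l1), ("GBPUSD".toList, l2), ("XAUUSD".toList, l3), ("DAX40".toList, l4 ++ [u]), ("US500".toList, l5)] := rfl
            rw [hm, ih]
            rw [pv_route_cons ("EURUSD".toList), pv_if_bool_false _ (by rw [hlk]; decide), List.nil_append]
            rw [pv_route_cons ("GBPUSD".toList), pv_if_bool_false _ (by rw [hlk]; decide), List.nil_append]
            rw [pv_route_cons ("XAUUSD".toList), pv_if_bool_false _ (by rw [hlk]; decide), List.nil_append]
            rw [pv_route_cons ("DAX40".toList), pv_if_bool_true _ (by rw [hlk]; decide), List.singleton_append]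
            rw [pv_route_cons ("US500".toList), pv_if_bool_false _ (by rw [hlk]; decide), List.nil_append]
            simp [List.append_assoc]
          · rw [hstep]
            have hm : (PySem.Dict.mk [("EURUSD".toList, l1), ("GBPUSD".toList, l2), ("XAUUSD".toList, l3), ("DAX40".toList, l4), ("US500".toList, l5)]).modify ("US500".toList) [] (fun l => l ++ [u]) =
                PySem.Dict.mk [("EURUSD".toList, l1), ("GBPUSD".toList, l2), ("XAUUSD".toList, l3), ("DAX40".toList, l4), ("US500".toList, l5 ++ [u])] := rfl
            rw [hm, ih]
            rw [pv_route_cons ("EURUSD".toList), pv_if_bool_false _ (by rw [hlk]; decide), List.nil_append]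
            rw [pv_route_cons ("GBPUSD".toList), pv_if_bool_false _ (by rw [hlk]; decide), List.nil_append]
            rw [pv_route_cons ("XAUUSD".toList), pv_if_bool_false _ (by rw [hlk]; decide), List.nil_append]
            rw [pv_route_cons ("DAX40".toList), pv_if_bool_false _ (by rw [hlk]; decide), List.nil_append]
            rw [pv_route_cons ("US500".toList), pv_if_bool_true _ (by rw [hlk]; decide), List.singleton_append]
            simp [List.append_assoc]

-- ---- seen = set(nonempty normalized names), preserving first-occurrence-dedup structure ----
theorem pv_normNames_cons (x : String) (xs : List String) :
    pvNormNames (x :: xs) =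
      (if (pvA_norm x.toList == []) = true then [] else [pvA_norm x.toList]) ++ pvNormNames xs := by
  unfold pvNormNames
  rw [List.map_cons, pv_filter_cons_append, List.map_append]
  by_cases h : (pvA_norm x.toList == []) = true
  · rw [pv_if_bool_true _ h, pv_if_bool_false _ (by rw [h]; rfl)]
    simp
  · have hf : (pvA_norm x.toList == []) = false := Bool.eq_false_iff.mpr h
    rw [pv_if_bool_false _ hf, pv_if_bool_true _ (by rw [hf]; rfl)]
    simp

theorem pv_seen_fold (ns : List String) (s : PySem.Set (List Char)) :
    ns.foldl (fun s x =>
      let u := PySem.Chars.upper (PySem.Chars.strip (if x.toList == [] then [] else x.toList))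
      if u == [] then s else PySem.Set.add s u) s
      = (pvNormNames ns).foldl PySem.Set.add s := by
  induction ns generalizing s with
  | nil => rfl
  | cons x xs ih =>
      rw [List.foldl_cons, pv_normNames_cons]
      by_cases h : (pvA_norm x.toList == []) = true
      · rw [pv_if_bool_true _ h, List.nil_append]
        show List.foldl _ (if (pvA_norm x.toList == []) = true then s else PySem.Set.add s (pvA_norm x.toList)) xs = _
        rw [pv_if_bool_true _ h]
        exact ih s
      · have hf : (pvA_norm x.toList == []) = false := Bool.eq_false_iff.mpr h
        rw [pv_if_bool_false _ hf, List.singleton_append, List.foldl_cons]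
        show List.foldl _ (if (pvA_norm x.toList == []) = true then s else PySem.Set.add s (pvA_norm x.toList)) xs = _
        rw [pv_if_bool_false _ hf]
        exact ih (PySem.Set.add s (pvA_norm x.toList))

theorem pv_seen (ns : List String) :
    ns.foldl (fun s x =>
      let u := PySem.Chars.upper (PySem.Chars.strip (if x.toList == [] then [] else x.toList))
      if u == [] then s else PySem.Set.add s u) PySem.Set.empty
      = PySem.Set.ofList (pvNormNames ns) := by
  rw [pv_seen_fold]
  rfl

-- ---- the two closed forms ----
theorem pv_items5 (v1 v2 v3 v4 v5 : List (List Char)) :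
    (((((PySem.Dict.empty.insert ("EURUSD".toList) v1).insert ("GBPUSD".toList) v2).insert ("XAUUSD".toList) v3).insert ("DAX40".toList) v4).insert ("US500".toList) v5).items
      = [("EURUSD".toList, v1), ("GBPUSD".toList, v2), ("XAUUSD".toList, v3), ("DAX40".toList, v4), ("US500".toList, v5)] := by
  rfl

theorem pv_A_eq (ns : List String) :
    resolve_target_hits ns =
      (pvA_TARGET_BASES.map (fun t => (t, PySem.List.sorted (PySem.Set.ofList (pvAout t ns)) (fun x => x)))).map
        (fun p => (String.ofList p.1, p.2.map String.ofList)) := by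
  simp only [resolve_target_hits, pvA_TARGET_BASES, List.foldl_cons, List.foldl_nil]
  rw [pv_items5]
  simp only [List.map_cons, List.map_nil, PySem.List.foldl_append_if (f := fun x => x),
    List.nil_append, List.map_id_fun', id_eq, pvAout, pvNormNames]

theorem pv_B_eq (ns : List String) :
    resolve_target_hits_alt ns =
      (pvB_TARGET_BASES.map (fun t => (t, pvRoute t (PySem.List.sorted (PySem.Set.ofList (pvNormNames ns)) (fun x => x))))).map
        (fun p => (String.ofList p.1, p.2.map String.ofList)) := by
  simp only [resolve_target_hits_alt]
  rw [pv_stepB_eq, pv_seen]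
  have h0 : pvB_TARGET_BASES.foldl (fun d t => d.insert t []) PySem.Dict.empty =
      PySem.Dict.mk ([("EURUSD".toList, []), ("GBPUSD".toList, []), ("XAUUSD".toList, []), ("DAX40".toList, []), ("US500".toList, [])] : List ((List Char) × List (List Char))) := by decide
  rw [h0, pv_bfold]
  rfl

-- ---- membership in pvNormNames gives norm-idempotence ----
theorem pv_mem_normNames (u : List Char) (ns : List String) (h : u ∈ pvNormNames ns) : pvA_norm u = u := by
  unfold pvNormNames at h
  obtain ⟨x, _, rfl⟩ := List.mem_map.mp h
  exact pv_norm_idem x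

-- ---- sorted(set(filter)) = filter(sorted(set)) ----
-- the two Decidable-LT instances on List Char are subsingleton-equal
theorem pv_sorted_inst (xs : List (List Char)) :
    PySem.List.sorted xs (fun x => x) =
      @PySem.List.sorted (List Char) (List Char) LinearOrder.toPartialOrder.toPreorder.toLT LinearOrder.toDecidableLT xs (fun x => x) false := by
  rw [Subsingleton.elim (fun (a b : List Char) => a.decidableLT b) (@LinearOrder.toDecidableLT (List Char) _)]

theorem pv_comm (p : List Char → Bool) (L : List (List Char)) :
    PySem.List.sorted (PySem.Set.ofList (L.filter p)) (fun x => x) =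
      (PySem.List.sorted (PySem.Set.ofList L) (fun x => x)).filter p := by
  rw [pv_sorted_inst, pv_sorted_inst]
  have hpw := PySem.List.sorted_ofList_pairwise_lt (xs := L)
  have hpwf := hpw.filter p
  have hperm : (List.filter p (@PySem.List.sorted (List Char) (List Char) LinearOrder.toPartialOrder.toPreorder.toLT LinearOrder.toDecidableLT (PySem.Set.ofList L) (fun x => x) false)).Perm (PySem.Set.ofList (L.filter p)) := by
    apply (List.perm_ext_iff_of_nodup (hpwf.imp (fun h => ne_of_lt h)) (PySem.Set.nodup_ofList _)).mpr
    intro a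
    simp only [List.mem_filter, PySem.List.mem_sorted, PySem.Set.mem_ofList]
  exact PySem.List.sorted_eq_of_perm_of_pairwise_lt _ _ _ hperm hpwf

-- ---- per-target equality of the buckets ----
theorem pv_aout_filter_EURUSD (ns : List String) :
    pvAout ("EURUSD".toList) ns = (pvNormNames ns).filter (fun u => pvB_ALIAS_TO_TARGET.get? ((PySem.Chars.splitOnMax u ['.'] 1).headD []) == some ("EURUSD".toList)) := by
  unfold pvAout
  apply List.filter_congr
  intro u hu
  rw [pv_acond_EURUSD u (pv_mem_normNames u ns hu), pv_split_head]

theorem pv_aout_filter_GBPUSD (ns : List String) :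
    pvAout ("GBPUSD".toList) ns = (pvNormNames ns).filter (fun u => pvB_ALIAS_TO_TARGET.get? ((PySem.Chars.splitOnMax u ['.'] 1).headD []) == some ("GBPUSD".toList)) := by
  unfold pvAout
  apply List.filter_congr
  intro u hu
  rw [pv_acond_GBPUSD u (pv_mem_normNames u ns hu), pv_split_head]

theorem pv_aout_filter_XAUUSD (ns : List String) :
    pvAout ("XAUUSD".toList) ns = (pvNormNames ns).filter (fun u => pvB_ALIAS_TO_TARGET.get? ((PySem.Chars.splitOnMax u ['.'] 1).headD []) == some ("XAUUSD".toList)) := by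
  unfold pvAout
  apply List.filter_congr
  intro u hu
  rw [pv_acond_XAUUSD u (pv_mem_normNames u ns hu), pv_split_head]

theorem pv_aout_filter_DAX40 (ns : List String) :
    pvAout ("DAX40".toList) ns = (pvNormNames ns).filter (fun u => pvB_ALIAS_TO_TARGET.get? ((PySem.Chars.splitOnMax u ['.'] 1).headD []) == some ("DAX40".toList)) := by
  unfold pvAout
  apply List.filter_congr
  intro u hu
  rw [pv_acond_DAX40 u (pv_mem_normNames u ns hu), pv_split_head]

theorem pv_aout_filter_US500 (ns : List String) :
    pvAout ("US500".toList) ns = (pvNormNames ns).filter (fun u => pvB_ALIAS_TO_TARGET.get? ((PySem.Chars.splitOnMax u ['.'] 1).headD []) == some ("US500".toList)) := by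
  unfold pvAout
  apply List.filter_congr
  intro u hu
  rw [pv_acond_US500 u (pv_mem_normNames u ns hu), pv_split_head]

theorem pv_bucket_EURUSD (ns : List String) :
    PySem.List.sorted (PySem.Set.ofList (pvAout ("EURUSD".toList) ns)) (fun x => x)
      = pvRoute ("EURUSD".toList) (PySem.List.sorted (PySem.Set.ofList (pvNormNames ns)) (fun x => x)) := by
  rw [pv_aout_filter_EURUSD, pv_comm]; rfl

theorem pv_bucket_GBPUSD (ns : List String) :
    PySem.List.sorted (PySem.Set.ofList (pvAout ("GBPUSD".toList) ns)) (fun x => x)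
      = pvRoute ("GBPUSD".toList) (PySem.List.sorted (PySem.Set.ofList (pvNormNames ns)) (fun x => x)) := by
  rw [pv_aout_filter_GBPUSD, pv_comm]; rfl

theorem pv_bucket_XAUUSD (ns : List String) :
    PySem.List.sorted (PySem.Set.ofList (pvAout ("XAUUSD".toList) ns)) (fun x => x)
      = pvRoute ("XAUUSD".toList) (PySem.List.sorted (PySem.Set.ofList (pvNormNames ns)) (fun x => x)) := by
  rw [pv_aout_filter_XAUUSD, pv_comm]; rfl

theorem pv_bucket_DAX40 (ns : List String) :
    PySem.List.sorted (PySem.Set.ofList (pvAout ("DAX40".toList) ns)) (fun x => x)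
      = pvRoute ("DAX40".toList) (PySem.List.sorted (PySem.Set.ofList (pvNormNames ns)) (fun x => x)) := by
  rw [pv_aout_filter_DAX40, pv_comm]; rfl

theorem pv_bucket_US500 (ns : List String) :
    PySem.List.sorted (PySem.Set.ofList (pvAout ("US500".toList) ns)) (fun x => x)
      = pvRoute ("US500".toList) (PySem.List.sorted (PySem.Set.ofList (pvNormNames ns)) (fun x => x)) := by
  rw [pv_aout_filter_US500, pv_comm]; rfl

-- ===== VERDICT (by name: the statement is the Claim_ definition above) =====
theorem resolve_target_hits_spec : Claim_equal_resolve_target_hits := by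
  intro ns _hdom
  unfold Spec_resolve_target_hits
  rw [pv_A_eq, pv_B_eq]
  simp only [pvA_TARGET_BASES, pvB_TARGET_BASES, List.map_cons, List.map_nil,
    pv_bucket_EURUSD, pv_bucket_GBPUSD, pv_bucket_XAUUSD, pv_bucket_DAX40, pv_bucket_US500]
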